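-- pv_equiv track=rewrite | github.com/kwonjuyeong/Baekjoon_CodingTest | 프로그래머스/unrated/181893. 배열 조각하기/배열 조각하기.py | solution
-- ===== SOURCE A (Python) =====
-- def solution(arr, query):
--     answer = arr
--
--     for i in range(len(query)):
--         if i % 2 == 0: #짝수 인덱스(뒷부분 자르기)
--             answer = answer[0:query[i]+1:]
--         else: #홀수 인덱스(앞부분 자르기)
--             answer = answer[query[i]:len(answer)+1:]
--
--     return answer
-- ===== SOURCE B (Python) =====
-- def solution(arr, query):
--     # Track cumulative window [lo, lo+n) over arr; one slice at the end.
--     def clamp(s, length):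
--         if s < 0:
--             s += length
--         return min(max(s, 0), length)
--
--     lo, n = 0, len(arr)
--     for i, q in enumerate(query):
--         if i % 2 == 0:
--             n = clamp(q + 1, n)
--         else:
--             d = clamp(q, n)
--             lo += d
--             n -= d
--     return arr[lo:lo + n]
-- ===== Notes on version B (the rewrite author's own statement) =====
-- stated objective: alternative
-- what changed: Instead of materialising a new sliced list for every query, B folds the queries into a cumulative window (offset, length) pair -- clamping each bound exactly as Python slicing does -- and takes a single slice of the original array at the end.
import Mathlib
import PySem

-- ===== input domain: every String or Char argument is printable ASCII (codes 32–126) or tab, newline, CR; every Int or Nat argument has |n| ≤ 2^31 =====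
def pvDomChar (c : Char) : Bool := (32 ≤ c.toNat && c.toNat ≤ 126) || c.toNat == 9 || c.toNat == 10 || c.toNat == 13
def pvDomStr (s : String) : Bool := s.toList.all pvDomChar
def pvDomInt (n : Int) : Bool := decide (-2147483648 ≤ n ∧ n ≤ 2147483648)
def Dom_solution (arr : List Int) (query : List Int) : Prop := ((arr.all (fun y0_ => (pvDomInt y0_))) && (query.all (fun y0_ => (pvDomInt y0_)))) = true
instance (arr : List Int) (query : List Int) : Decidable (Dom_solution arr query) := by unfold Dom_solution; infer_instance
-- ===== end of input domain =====

-- B replaces A's repeated list slicing (one new list per query) by folding the queries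
-- into cumulative window bounds and taking a single slice of arr at the end.


-- ===== PORT A =====
def solution (arr : List Int) (query : List Int) : List Int :=
  (PySem.List.pyRange 0 (query.length : Int) 1).foldl
    (fun answer i =>
      if PySem.Int.mod i 2 == 0 then
        PySem.List.slice answer (some 0) (some (PySem.List.pyGetD query i 0 + 1))
      else
        PySem.List.slice answer (some (PySem.List.pyGetD query i 0)) (some ((answer.length : Int) + 1)))
    arr

-- ===== PORT B =====
-- clamp(s, length) from Source B: normalise a Python slice bound to [0, length]
def pvClamp (s : Int) (len : Int) : Int :=
  let s' := if s < 0 then s + len else s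
  min (max s' 0) len

def solution_alt (arr : List Int) (query : List Int) : List Int :=
  let st := (PySem.List.enumerate query).foldl
    (fun (p : Int × Int) iq =>
      if PySem.Int.mod iq.1 2 == 0 then
        (p.1, pvClamp (iq.2 + 1) p.2)
      else
        let d := pvClamp iq.2 p.2
        (p.1 + d, p.2 - d))
    (0, (arr.length : Int))
  PySem.List.slice arr (some st.1) (some (st.1 + st.2))

-- ===== PRECONDITION & SPEC =====
def Spec_solution (arr : List Int) (query : List Int) (out : List Int) : Prop := out = solution_alt arr query
instance (arr : List Int) (query : List Int) (out : List Int) : Decidable (Spec_solution arr query out) := by unfold Spec_solution; infer_instance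

-- ===== CLAIM (what is proved, stated in full; the proofs are below) =====
def Claim_equal_solution : Prop := ∀ (arr : List Int) (query : List Int), Dom_solution arr query → Spec_solution arr query (solution arr query)

-- ===== LEMMAS AND PROOFS =====

-- A's loop as a structural recursion carrying the parity of the query index.
def goA (b : Bool) (qs : List Int) (xs : List Int) : List Int :=
  match qs with
  | [] => xs
  | q :: t =>
      goA (!b) t
        (if b then PySem.List.slice xs (some 0) (some (q + 1))
         else PySem.List.slice xs (some q) (some ((xs.length : Int) + 1)))

-- B's loop as a structural recursion on the same parity.
def goB (b : Bool) (qs : List Int) (p : Int × Int) : Int × Int :=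
  match qs with
  | [] => p
  | q :: t =>
      goB (!b) t
        (if b then (p.1, pvClamp (q + 1) p.2)
         else (p.1 + pvClamp q p.2, p.2 - pvClamp q p.2))

lemma parity_cast (j : Nat) : (PySem.Int.mod (j : Int) 2 == 0) = (j % 2 == 0) := by
  rw [PySem.Int.mod_eq_emod_of_pos (by norm_num)]
  have hj : (j : Int) % 2 = ((j % 2 : Nat) : Int) := by omega
  rw [hj]
  rcases Nat.mod_two_eq_zero_or_one j with h | h <;> rw [h] <;> decide

lemma parity_succ (j : Nat) : ((j + 1) % 2 == 0) = !(j % 2 == 0) := by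
  rcases Nat.mod_two_eq_zero_or_one j with h | h <;> simp [Nat.add_mod, h]

lemma A_fold (full : List Int) :
    ∀ (qs : List Int) (j : Nat) (xs : List Int),
      (∀ k, (hk : k < qs.length) → PySem.List.pyGetD full ((j + k : Nat) : Int) 0 = qs[k]) →
      (PySem.List.pyRange (j : Int) ((j : Int) + qs.length) 1).foldl
        (fun answer i =>
          if PySem.Int.mod i 2 == 0 then
            PySem.List.slice answer (some 0) (some (PySem.List.pyGetD full i 0 + 1))
          else
            PySem.List.slice answer (some (PySem.List.pyGetD full i 0)) (some ((answer.length : Int) + 1)))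
        xs
      = goA (j % 2 == 0) qs xs := by
  intro qs
  induction qs with
  | nil => intro j xs _; simp [goA]
  | cons q t ih =>
    intro j xs h
    rw [PySem.List.pyRange_one_cons (by simp only [List.length_cons]; push_cast; omega)]
    have e1 : (j : Int) + 1 = ((j + 1 : Nat) : Int) := by push_cast; ring
    have e2 : (j : Int) + ((q :: t).length : Int)
        = ((j + 1 : Nat) : Int) + (t.length : Int) := by
      simp only [List.length_cons]; push_cast; ring
    have hrange : PySem.List.pyRange ((j : Int) + 1) ((j : Int) + (↑(q :: t).length)) 1
        = PySem.List.pyRange ((j + 1 : Nat) : Int) (((j + 1 : Nat) : Int) + (t.length : Int)) 1 := by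
      rw [e1, e2]
    have hq : PySem.List.pyGetD full (j : Int) 0 = q := by
      have := h 0 (by simp)
      simpa using this
    have ht : ∀ k, (hk : k < t.length) →
        PySem.List.pyGetD full ((j + 1 + k : Nat) : Int) 0 = t[k] := by
      intro k hk
      have := h (k + 1) (by simpa using Nat.succ_lt_succ hk)
      simpa [Nat.add_assoc, Nat.add_comm 1 k] using this
    simp only [List.foldl_cons]
    rw [hrange, ih (j + 1) _ ht, parity_succ]
    simp only [goA, parity_cast, hq]

lemma B_fold :
    ∀ (qs : List Int) (j : Nat) (p : Int × Int),
      (PySem.List.enumerate qs (j : Int)).foldl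
        (fun (p : Int × Int) iq =>
          if PySem.Int.mod iq.1 2 == 0 then
            (p.1, pvClamp (iq.2 + 1) p.2)
          else
            (p.1 + pvClamp iq.2 p.2, p.2 - pvClamp iq.2 p.2))
        p
      = goB (j % 2 == 0) qs p := by
  intro qs
  induction qs with
  | nil => intro j p; simp [goB, PySem.List.enumerate]
  | cons q t ih =>
    intro j p
    rw [PySem.List.enumerate_cons]
    have : (j : Int) + 1 = ((j + 1 : Nat) : Int) := by push_cast; ring
    simp only [List.foldl_cons, this, ih (j + 1), parity_succ]
    simp only [goB, parity_cast]

lemma pvClamp_bounds (s len : Int) (h : 0 ≤ len) : 0 ≤ pvClamp s len ∧ pvClamp s len ≤ len := by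
  simp only [pvClamp]
  split <;> omega

lemma clampIdx_eq_pvClamp (s n : Int) (hn : 0 ≤ n) :
    PySem.List.clampIdx n.toNat s = (pvClamp s n).toNat := by
  simp only [PySem.List.clampIdx, pvClamp]
  split_ifs <;> omega

lemma goB_bounds (L : Int) :
    ∀ (qs : List Int) (b : Bool) (lo n : Int), 0 ≤ lo → 0 ≤ n → lo + n ≤ L →
      0 ≤ (goB b qs (lo, n)).1 ∧ 0 ≤ (goB b qs (lo, n)).2 ∧
        (goB b qs (lo, n)).1 + (goB b qs (lo, n)).2 ≤ L := by
  intro qs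
  induction qs with
  | nil => intro b lo n h1 h2 h3; simp [goB]; omega
  | cons q t ih =>
    intro b lo n h1 h2 h3
    cases b with
    | true =>
      have hc := pvClamp_bounds (q + 1) n h2
      simpa [goB] using ih false lo (pvClamp (q + 1) n) h1 hc.1 (by omega)
    | false =>
      have hc := pvClamp_bounds q n h2
      simpa [goB] using ih true (lo + pvClamp q n) (n - pvClamp q n) (by omega) (by omega) (by omega)

-- slice of a list of known length, both bounds arbitrary, via pvClamp
lemma slice_window (arr : List Int) (lo n : Int) (h0 : 0 ≤ lo) (h1 : 0 ≤ n)
    (h2 : lo + n ≤ (arr.length : Int)) (a b : Int) :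
    PySem.List.slice ((arr.drop lo.toNat).take n.toNat) (some a) (some b)
      = ((arr.drop (lo.toNat + (pvClamp a n).toNat)).take
          ((pvClamp b n).toNat - (pvClamp a n).toNat)) := by
  have hlen : ((arr.drop lo.toNat).take n.toNat).length = n.toNat := by
    simp [List.length_take, List.length_drop]
    omega
  have ha := pvClamp_bounds a n h1
  have hb := pvClamp_bounds b n h1
  simp only [PySem.List.slice, hlen, clampIdx_eq_pvClamp _ n h1]
  rw [List.drop_take, List.take_take, List.drop_drop]
  congr 1
  omega

lemma core (arr : List Int) :
    ∀ (qs : List Int) (b : Bool) (lo n : Int), 0 ≤ lo → 0 ≤ n → lo + n ≤ (arr.length : Int) →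
      goA b qs ((arr.drop lo.toNat).take n.toNat)
        = (arr.drop (goB b qs (lo, n)).1.toNat).take (goB b qs (lo, n)).2.toNat := by
  intro qs
  induction qs with
  | nil => intro b lo n _ _ _; simp [goA, goB]
  | cons q t ih =>
    intro b lo n h1 h2 h3
    cases b with
    | true =>
      have hc := pvClamp_bounds (q + 1) n h2
      have hstep : PySem.List.slice ((arr.drop lo.toNat).take n.toNat) (some 0) (some (q + 1))
          = (arr.drop lo.toNat).take (pvClamp (q + 1) n).toNat := by
        rw [slice_window arr lo n h1 h2 h3]
        have hz : pvClamp 0 n = 0 := by simp only [pvClamp]; omega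
        rw [hz]
        simp
      simp only [goA, goB, Bool.not_true, if_true]
      rw [hstep, ih false lo (pvClamp (q + 1) n) h1 hc.1 (by omega)]
    | false =>
      have hc := pvClamp_bounds q n h2
      have hstep : PySem.List.slice ((arr.drop lo.toNat).take n.toNat) (some q)
            (some ((((arr.drop lo.toNat).take n.toNat).length : Int) + 1))
          = (arr.drop ((lo + pvClamp q n).toNat)).take ((n - pvClamp q n).toNat) := by
        have hlen : ((arr.drop lo.toNat).take n.toNat).length = n.toNat := by
          simp [List.length_take, List.length_drop]
          omega
        rw [hlen, slice_window arr lo n h1 h2 h3]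
        have hn1 : pvClamp ((n.toNat : Int) + 1) n = n := by simp only [pvClamp]; omega
        rw [hn1]
        congr 1
        · omega
        · congr 1
          omega
      simp only [goA, goB, Bool.not_false, Bool.false_eq_true, if_false]
      rw [hstep, ih true (lo + pvClamp q n) (n - pvClamp q n) (by omega) (by omega) (by omega)]

-- ===== VERDICT (by name: the statement is the Claim_ definition above) =====
theorem solution_spec : Claim_equal_solution := by
  intro arr query _
  unfold Spec_solution solution solution_alt
  have hA := A_fold query query 0 arr (by
    intro k hk
    simpa using PySem.List.pyGetD_ofNat query k 0 hk)
  have hB := B_fold query 0 (0, (arr.length : Int))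
  simp only [Nat.cast_zero, zero_add, Nat.zero_mod, show ((0:Nat) == 0) = true from rfl] at hA hB
  have harr : arr = (arr.drop (0 : Int).toNat).take ((arr.length : Int)).toNat := by simp
  have hbnd := goB_bounds (arr.length : Int) query true 0 (arr.length : Int)
    le_rfl (by positivity) (by omega)
  rw [hA]
  conv_lhs => rw [harr]
  rw [core arr query true 0 (arr.length : Int) le_rfl (by positivity) (by omega)]
  rw [hB]
  rw [PySem.List.slice_toNat _ hbnd.1 (by omega)]
  congr 1
  omega
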